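-- pv_equiv track=rewrite | github.com/sl33pingmathrapt0r/LeetCode.et.al | Sliding Window/Maximum_Difference_with_Prior_Smaller_Element.py | maxTrailing
-- ===== SOURCE A (Python) =====
-- def maxTrailing(arr):
--     # Write your code here
--     """
--     Given an array of integers, without
--     reordering, determine the maximum
--     difference between any element and
--     any prior smaller element. If there
--     is never a lower prior element,
--     return -1.
--
--     (Implement sliding window algoritm)
--     """
--     if len(arr)==1:
--         return -1
--
--     if len(arr)==2:
--         return arr[1]-arr[0] if arr[1]>arr[0] else -1
--
--     cur=1
--     prior=arr[0]
--     diff=-1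
--     while cur<len(arr):
--         if arr[cur]<prior:
--             prior=arr[cur]
--         elif arr[cur]>prior:
--             diff= max(diff, arr[cur]-prior)
--         cur+=1
--
--     return diff
-- ===== SOURCE B (Python) =====
-- def maxTrailing(arr):
--     # prefix-minimum decomposition: pm[i] = min(arr[0..i]); then one pass
--     # over arr[1:], pairing each element with the prefix min before it.
--     pm = []
--     m = None
--     for x in arr:
--         m = x if m is None or x < m else m
--         pm.append(m)
--     best = -1
--     for x, p in zip(arr[1:], pm):
--         if x > p:
--             best = max(best, x - p)
--     return best
-- ===== Notes on version B (the rewrite author's own statement) =====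
-- stated objective: alternative
-- what changed: Replaced A's single stateful while loop (with special cases for lengths 1 and 2) by a two-pass prefix-minimum decomposition: build pm[i]=min(arr[0..i]), then fold max over arr[i]-pm[i-1] where arr[i]>pm[i-1].
-- crash fix: On the empty list A raises IndexError; B returns -1. — e.g. on maxTrailing([]): A raises IndexError, B returns -1
import Mathlib
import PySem

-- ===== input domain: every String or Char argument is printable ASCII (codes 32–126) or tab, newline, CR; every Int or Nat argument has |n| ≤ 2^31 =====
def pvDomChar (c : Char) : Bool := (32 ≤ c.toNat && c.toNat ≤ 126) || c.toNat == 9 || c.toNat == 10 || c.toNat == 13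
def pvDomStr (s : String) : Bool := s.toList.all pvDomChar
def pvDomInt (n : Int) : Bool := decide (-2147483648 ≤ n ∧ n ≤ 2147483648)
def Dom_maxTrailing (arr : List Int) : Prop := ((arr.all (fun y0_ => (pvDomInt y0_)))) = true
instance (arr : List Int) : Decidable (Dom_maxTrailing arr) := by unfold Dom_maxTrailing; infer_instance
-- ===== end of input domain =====

-- B replaces A's single stateful while loop by a two-pass prefix-minimum
-- decomposition; same cost, 'alternative' objective. On [] A raises, B returns -1.


-- ===== PORT A =====
-- A's while loop over cur=1..len-1 with state (prior, diff) becomes a foldl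
-- over arr.drop 1; the len==1 and len==2 early returns are kept as written.
def aStep (s : Int × Int) (x : Int) : Int × Int :=
  if x < s.1 then (x, s.2)
  else if x > s.1 then (s.1, max s.2 (x - s.1))
  else s

def maxTrailing (arr : List Int) : Int :=
  if arr.length = 1 then -1
  else if arr.length = 2 then
    (if arr.getD 1 0 > arr.getD 0 0 then arr.getD 1 0 - arr.getD 0 0 else -1)
  else
    ((arr.drop 1).foldl aStep (arr.getD 0 0, -1)).2

-- ===== PORT B =====
-- first pass of Source B builds pm (prefix minima) with running state (pm, m);
-- second pass folds max over the zipped pairs, exactly as in Source B.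
def pmStep (s : List Int × Option Int) (x : Int) : List Int × Option Int :=
  let m : Int := match s.2 with
    | none => x
    | some m => if x < m then x else m
  (s.1 ++ [m], some m)

def bStep (best : Int) (xp : Int × Int) : Int :=
  if xp.1 > xp.2 then max best (xp.1 - xp.2) else best

def maxTrailing_alt (arr : List Int) : Int :=
  let pm := (arr.foldl pmStep ([], none)).1
  ((arr.drop 1).zip pm).foldl bStep (-1)

-- ===== PRECONDITION & SPEC =====
-- A reads the first element unconditionally when the length is not 1 or 2, so it raises IndexError on the empty list.
def Pre_maxTrailing (arr : List Int) : Prop := arr ≠ []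
instance (arr : List Int) : Decidable (Pre_maxTrailing arr) := by unfold Pre_maxTrailing; infer_instance
def pvWitness_maxTrailing : List Int := [3, 1, 4]

-- On the empty list A raises IndexError; B returns -1.
def Raises_maxTrailing (arr : List Int) : Prop := arr = []
instance (arr : List Int) : Decidable (Raises_maxTrailing arr) := by unfold Raises_maxTrailing; infer_instance
def pvRaiseWitness_maxTrailing : List Int := []
def pvRaiseWitnessOut_maxTrailing : Int := -1

def Spec_maxTrailing (arr : List Int) (out : Int) : Prop := out = maxTrailing_alt arr
instance (arr : List Int) (out : Int) : Decidable (Spec_maxTrailing arr out) := by unfold Spec_maxTrailing; infer_instance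

-- ===== CLAIM (what is proved, stated in full; the proofs are below) =====
def Claim_equal_maxTrailing : Prop := ∀ (arr : List Int), Dom_maxTrailing arr → Pre_maxTrailing arr → Spec_maxTrailing arr (maxTrailing arr)
def Claim_raises_maxTrailing : Prop := (∀ (arr : List Int), Dom_maxTrailing arr → Raises_maxTrailing arr → ¬ Pre_maxTrailing arr) ∧ (Dom_maxTrailing (pvRaiseWitness_maxTrailing) ∧ Raises_maxTrailing (pvRaiseWitness_maxTrailing) ∧ maxTrailing_alt (pvRaiseWitness_maxTrailing) = pvRaiseWitnessOut_maxTrailing)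

-- ===== LEMMAS AND PROOFS =====

-- the prefix-minimum sequence B's first pass computes, in direct form
def scanMin (m : Int) : List Int → List Int
  | [] => [m]
  | x :: xs => m :: scanMin (if x < m then x else m) xs

theorem scanMin_head (m : Int) (xs : List Int) :
    m :: (scanMin m xs).drop 1 = scanMin m xs := by
  cases xs <;> simp [scanMin]

theorem pmFold_eq (xs : List Int) : ∀ (acc : List Int) (m : Int),
    (xs.foldl pmStep (acc, some m)).1 = acc ++ (scanMin m xs).drop 1 := by
  induction xs with
  | nil => intro acc m; simp [scanMin]
  | cons x xs ih =>
      intro acc m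
      simp only [List.foldl, pmStep, scanMin, List.drop_succ_cons, List.drop_zero]
      rw [ih, List.append_assoc, List.singleton_append, scanMin_head]

theorem loop_eq (xs : List Int) : ∀ (prior best : Int),
    (xs.foldl aStep (prior, best)).2
    = (xs.zip (scanMin prior xs)).foldl bStep best := by
  induction xs with
  | nil => intro prior best; simp
  | cons x xs ih =>
      intro prior best
      simp only [List.foldl, scanMin, List.zip_cons_cons, aStep, bStep]
      by_cases h1 : x < prior
      · simp only [if_pos h1, if_neg (by omega : ¬ x > prior)]
        exact ih x best
      · by_cases h2 : x > prior
        · simp only [if_neg h1, if_pos h2]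
          exact ih prior (max best (x - prior))
        · simp only [if_neg h1, if_neg h2]
          exact ih prior best

theorem alt_cons (a : Int) (rest : List Int) :
    maxTrailing_alt (a :: rest) = (rest.zip (scanMin a rest)).foldl bStep (-1) := by
  unfold maxTrailing_alt
  simp only [List.foldl, List.drop_succ_cons, List.drop_zero]
  have h0 : pmStep ([], none) a = ([a], some a) := by simp [pmStep]
  rw [h0, pmFold_eq rest [a] a, List.singleton_append, scanMin_head]

theorem maxTrailing_spec : Claim_equal_maxTrailing := by
  intro arr _ hpre
  unfold Spec_maxTrailing
  match arr with
  | [] => exact absurd rfl hpre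
  | [a] => simp [maxTrailing, alt_cons, scanMin]
  | a :: b :: rest =>
      rw [alt_cons]
      unfold maxTrailing
      cases rest with
      | nil =>
          simp only [List.length, scanMin, List.zip_cons_cons, List.zip_nil_left,
            List.foldl, bStep]
          by_cases h : b > a
          · simp [h, show max (-1 : Int) (b - a) = b - a by omega]
          · simp [h]
      | cons c cs =>
          have hl1 : ¬ (a :: b :: c :: cs).length = 1 := by simp
          have hl2 : ¬ (a :: b :: c :: cs).length = 2 := by simp
          rw [if_neg hl1, if_neg hl2]
          simp only [List.drop_succ_cons, List.drop_zero, List.getD_cons_zero]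
          exact loop_eq (b :: c :: cs) a (-1)

@[simp]
theorem maxTrailing_raises : Claim_raises_maxTrailing := by
  unfold Claim_raises_maxTrailing
  exact ⟨fun arr _ hr hp => hp hr, by decide⟩
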